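-- pv_equiv track=rewrite | github.com/acolajanni/Signature_matrix_TabulaSapiens | scripts/functions/utils.py | replace_label
-- ===== SOURCE A (Python) =====
-- def replace_label(lab_list, pattern_list, replace_list, replace_other = "other_cell"):
--
--     for i, item in enumerate(lab_list):
--         c = 0
--
--         for index, pattern in enumerate(pattern_list) :
--
--             if pattern in item :
--                 lab_list[i] = replace_list[index]
--                 continue
--             c+=1
--             if replace_other != None and c == len(pattern_list):
--                 lab_list[i] = replace_other
--
--     return(lab_list)
-- ===== SOURCE B (Python) =====
-- def replace_label(lab_list, pattern_list, replace_list, replace_other="other_cell"):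
--     n = len(pattern_list)
--     for i, item in enumerate(lab_list):
--         j = next((k for k in reversed(range(n)) if pattern_list[k] in item), None)
--         if j is not None:
--             lab_list[i] = replace_list[j]
--         elif replace_other is not None and n > 0:
--             lab_list[i] = replace_other
--     return lab_list
-- ===== Notes on version B (the rewrite author's own statement) =====
-- stated objective: faster
-- what changed: Instead of A's full forward pass over all patterns per label with a non-match counter and repeated overwrites of lab_list[i], B scans the patterns backwards and stops at the first (i.e. overall last) match, writing each slot at most once; the no-match/replace_other case follows directly instead of via the counter trick.
import Mathlib
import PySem

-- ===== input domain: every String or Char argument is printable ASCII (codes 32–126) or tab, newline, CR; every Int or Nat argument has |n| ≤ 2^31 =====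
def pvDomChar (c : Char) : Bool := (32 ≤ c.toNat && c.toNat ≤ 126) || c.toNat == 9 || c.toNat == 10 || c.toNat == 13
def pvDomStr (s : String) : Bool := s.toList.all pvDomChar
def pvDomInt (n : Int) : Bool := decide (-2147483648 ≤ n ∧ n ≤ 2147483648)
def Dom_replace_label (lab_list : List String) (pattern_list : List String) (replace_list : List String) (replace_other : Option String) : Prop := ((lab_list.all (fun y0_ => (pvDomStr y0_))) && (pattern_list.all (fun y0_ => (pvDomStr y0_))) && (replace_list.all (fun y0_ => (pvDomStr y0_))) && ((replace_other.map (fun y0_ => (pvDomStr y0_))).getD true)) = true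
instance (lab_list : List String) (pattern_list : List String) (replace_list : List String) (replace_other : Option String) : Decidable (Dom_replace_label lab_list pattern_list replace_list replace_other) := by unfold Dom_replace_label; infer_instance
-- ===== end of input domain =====

-- B replaces A's counter-driven forward overwrite pass by a backward first-match scan
-- (same return value; like A it mutates/returns lab_list in Python — the equivalence here is about the return value).
-- ===== PORT A =====
-- inner loop of A over enumerate(pattern_list); state = (current value of lab_list[i], c)
def replace_label_inner (replace_list : List String) (replace_other : Option String)
    (nPat : Nat) (item : String) :
    List (Int × String) → String × Nat → String × Nat
  | [], st => st
  | (index, pattern) :: rest, (cur, c) =>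
    if PySem.Str.isIn pattern item then
      -- lab_list[i] = replace_list[index]; continue   (IndexError excluded by Pre_, default "" unreachable there)
      replace_label_inner replace_list replace_other nPat item rest
        ((PySem.List.pyGet? replace_list index).getD "", c)
    else
      let c' := c + 1
      let cur' := if replace_other.isSome ∧ c' = nPat then replace_other.getD "" else cur
      replace_label_inner replace_list replace_other nPat item rest (cur', c')

def replace_label (lab_list : List String) (pattern_list : List String) (replace_list : List String) (replace_other : Option String) : List String :=
  -- A writes only lab_list[i] while visiting index i and reads only the original item, so the
  -- in-place index loop is the map of the inner loop's final value over the items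
  lab_list.map (fun item =>
    (replace_label_inner replace_list replace_other pattern_list.length item
      (PySem.List.enumerate pattern_list) (item, 0)).1)

-- ===== PORT B =====
def replace_label_alt (lab_list : List String) (pattern_list : List String) (replace_list : List String) (replace_other : Option String) : List String :=
  let n : Int := pattern_list.length
  lab_list.map (fun item =>
    match (PySem.List.pyRange 0 n 1).reverse.find?
        (fun k => PySem.Str.isIn (PySem.List.pyGetD pattern_list k "") item) with
    | some j => (PySem.List.pyGet? replace_list j).getD ""   -- replace_list[j] (IndexError excluded by Pre_)
    | none => if replace_other.isSome ∧ 0 < n then replace_other.getD "" else item)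

-- ===== PRECONDITION & SPEC =====
-- Pre_ excludes exactly the inputs where Python A raises IndexError: some label is matched by a
-- pattern whose index is out of range of replace_list (B raises there too).
def Pre_replace_label (lab_list : List String) (pattern_list : List String) (replace_list : List String) (replace_other : Option String) : Prop :=
  ∀ item ∈ lab_list, ∀ p ∈ PySem.List.enumerate pattern_list,
    PySem.Str.isIn p.2 item = true → p.1 < (replace_list.length : Int)
instance (lab_list : List String) (pattern_list : List String) (replace_list : List String) (replace_other : Option String) : Decidable (Pre_replace_label lab_list pattern_list replace_list replace_other) := by unfold Pre_replace_label; infer_instance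

def pvWitness_replace_label : List String × List String × List String × Option String :=
  (["T cell", "B cell", "rock"], ["T", "B"], ["t", "b"], some "other_cell")

def Spec_replace_label (lab_list : List String) (pattern_list : List String) (replace_list : List String) (replace_other : Option String) (out : List String) : Prop := out = replace_label_alt lab_list pattern_list replace_list replace_other
instance (lab_list : List String) (pattern_list : List String) (replace_list : List String) (replace_other : Option String) (out : List String) : Decidable (Spec_replace_label lab_list pattern_list replace_list replace_other out) := by unfold Spec_replace_label; infer_instance

-- ===== CLAIM (what is proved, stated in full; the proofs are below) =====
def Claim_equal_replace_label : Prop := ∀ (lab_list : List String) (pattern_list : List String) (replace_list : List String) (replace_other : Option String), Dom_replace_label lab_list pattern_list replace_list replace_other → Pre_replace_label lab_list pattern_list replace_list replace_other → Spec_replace_label lab_list pattern_list replace_list replace_other (replace_label lab_list pattern_list replace_list replace_other)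

-- ===== LEMMAS AND PROOFS =====

-- characterisation of A's inner loop: last match wins; the replace_other write can only
-- fire when the whole pattern list was scanned without a match
lemma inner_char (replace_list : List String) (replace_other : Option String) (nPat : Nat)
    (item : String) :
    ∀ (es : List (Int × String)) (cur : String) (c : Nat), c + es.length ≤ nPat →
      (replace_label_inner replace_list replace_other nPat item es (cur, c)).1 =
        match es.reverse.find? (fun p => PySem.Str.isIn p.2 item) with
        | some p => (PySem.List.pyGet? replace_list p.1).getD ""
        | none => if replace_other.isSome ∧ c + es.length = nPat ∧ es ≠ [] then replace_other.getD "" else cur := by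
  intro es
  induction es with
  | nil => intro cur c h; simp [replace_label_inner]
  | cons hd rest ih =>
    intro cur c h
    obtain ⟨index, pattern⟩ := hd
    simp only [List.length_cons] at h
    rw [replace_label_inner]
    by_cases hm : PySem.Str.isIn pattern item = true
    · simp only [hm, if_true]
      rw [ih ((PySem.List.pyGet? replace_list index).getD "") c (by omega)]
      rw [List.reverse_cons, List.find?_append]
      cases hf : rest.reverse.find? (fun p => PySem.Str.isIn p.2 item) with
      | some p => simp [hf]
      | none =>
        simp only [hf, Option.none_or, List.find?_cons, hm]
        have : ¬ (replace_other.isSome = true ∧ c + rest.length = nPat ∧ rest ≠ []) := by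
          rintro ⟨-, h1, h2⟩
          have : rest.length ≠ 0 := by simpa using h2
          omega
        simp [this]
    · simp only [Bool.not_eq_true] at hm
      simp only [hm, Bool.false_eq_true, if_false]
      rw [ih _ (c + 1) (by omega)]
      rw [List.reverse_cons, List.find?_append]
      cases hf : rest.reverse.find? (fun p => PySem.Str.isIn p.2 item) with
      | some p => simp [hf]
      | none =>
        simp only [hf, Option.none_or, List.find?_cons, hm, Bool.false_eq_true, if_false]
        by_cases hro : replace_other.isSome = true
        · by_cases hend : c + (rest.length + 1) = nPat
          · have hend' : c + 1 + rest.length = nPat := by omega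
            rcases List.eq_nil_or_concat rest with hr | hr
            · subst hr
              simp only [List.length_nil] at hend'
              simp [replace_label_inner, hro, hend, hend']
            · have hrne : rest ≠ [] := by rintro rfl; obtain ⟨l', b, hb⟩ := hr; simp at hb
              have hcne : c + 1 ≠ nPat := by
                have : rest.length ≠ 0 := by simpa using hrne
                omega
              simp [hcne, hro, hend, hend', hrne]
          · have hcne : c + 1 ≠ nPat := by omega
            have hend' : ¬ (c + 1 + rest.length = nPat) := by omega
            simp [hcne, hend, hend']
        · simp [hro]

-- ===== VERDICT (by name: the statement is the Claim_ definition above) =====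
theorem replace_label_spec : Claim_equal_replace_label := by
  intro lab_list pattern_list replace_list replace_other _ _
  unfold Spec_replace_label replace_label replace_label_alt
  refine List.map_congr_left ?_
  intro item _
  rw [inner_char replace_list replace_other pattern_list.length item
        (PySem.List.enumerate pattern_list) item 0
        (by simp [PySem.List.length_enumerate])]
  rw [PySem.List.enumerate_eq_map_pyRange pattern_list ""]
  rw [← List.map_reverse, List.find?_map]
  simp only [Function.comp_def, PySem.Str.isIn_eq, PySem.List.len_eq]
  cases hf : (PySem.List.pyRange 0 (pattern_list.length : Int) 1).reverse.find?
      (fun j => PySem.Chars.isIn (PySem.List.pyGetD pattern_list j "").toList item.toList) with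
  | some j => simp [hf]
  | none =>
    simp only [hf, Option.map_none]
    by_cases hn : pattern_list = []
    · subst hn; simp
    · have h1 : (PySem.List.enumerate pattern_list).length = pattern_list.length :=
        PySem.List.length_enumerate ..
      have h2 : PySem.List.enumerate pattern_list ≠ [] := by
        intro h; apply hn; rw [h] at h1; exact List.length_eq_zero_iff.mp h1.symm
      have h3 : (0 : Int) < (pattern_list.length : Int) := by
        have := List.length_pos_iff.mpr hn; exact_mod_cast this
      have h4 : PySem.List.pyRange 0 (pattern_list.length : Int) 1 ≠ [] := by
        rw [PySem.List.pyRange_zero_natCast]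
        simp [hn]
      simp [h4, List.length_pos_iff.mpr hn, h3]
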